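-- pv_equiv track=rewrite | github.com/no4job/WER | SRC/wer.py | syncronize_list
-- ===== SOURCE A (Python) =====
-- def syncronize_list(lst_1,lst_2,edit_ops):
--     deletion = []
--     insertion = []
--     replacement = []
--     lst_1_sync = list( [e,''] for e in lst_1)
--     lst_2_sync = list( [e,''] for e in lst_2)
--     for op in edit_ops:
--         if op[0] == 'delete':
--             deletion.append(op[1])
--         if op[0] == 'insert':
--             insertion.append(op[1])
--         if op[0] == 'replace':
--             replacement.append(op[1])
--     insertion.sort(reverse=True)
--     for delete_position in deletion:
--         # lst_1_sync[delete_position]=">"+lst_1_sync[delete_position]+"<"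
--         lst_1_sync[delete_position][1]='delete'
--     for replace_position in replacement:
--         # lst_1_sync[replace_position]="|"+lst_1_sync[replace_position]+"|"
--         lst_1_sync[replace_position][1]='replace'
--     for insert_position in insertion:
--         # lst_1_sync.insert(insert_position,'<>')
--         lst_1_sync.insert(insert_position,['','insert'])
--     for delete_position in range(len(lst_1_sync)):
--         # if re.match('^>[^<>]*<$',lst_1_sync[delete_position]):
--         if lst_1_sync[delete_position][1] == 'delete':
--             lst_2_sync.insert(delete_position,['','skip'])
--     return lst_1_sync,lst_2_sync
-- ===== SOURCE B (Python) =====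
-- # Alternative reconstruction: tag/count arrays + a single merge pass, instead of repeated list.insert.
-- def syncronize_list(lst_1, lst_2, edit_ops):
--     n = len(lst_1)
--     tags = [''] * n
--     cnt = [0] * (n + 1)
--     for op in edit_ops:
--         kind, p = op[0], op[1]
--         if kind == 'replace':
--             tags[p] = 'replace'
--         elif kind == 'delete':
--             if tags[p] != 'replace':
--                 tags[p] = 'delete'
--         elif kind == 'insert':
--             cnt[p if p < n else n] += 1
--     lst_1_sync = []
--     for i in range(n):
--         lst_1_sync.extend([['', 'insert']] * cnt[i])
--         lst_1_sync.append([lst_1[i], tags[i]])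
--     lst_1_sync.extend([['', 'insert']] * cnt[n])
--     D = [j for j in range(len(lst_1_sync)) if lst_1_sync[j][1] == 'delete']
--     lst_2_sync = []
--     i2 = 0
--     for d in D:
--         while i2 < len(lst_2) and len(lst_2_sync) < d:
--             lst_2_sync.append([lst_2[i2], ''])
--             i2 += 1
--         lst_2_sync.append(['', 'skip'])
--     lst_2_sync.extend([e, ''] for e in lst_2[i2:])
--     return lst_1_sync, lst_2_sync
-- ===== Notes on version B (the rewrite author's own statement) =====
-- stated objective: alternative
-- what changed: Replaces A's repeated list.insert calls by tag/count arrays filled in one pass over edit_ops plus a single merge pass that builds both synchronized lists front-to-back.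
import Mathlib
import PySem

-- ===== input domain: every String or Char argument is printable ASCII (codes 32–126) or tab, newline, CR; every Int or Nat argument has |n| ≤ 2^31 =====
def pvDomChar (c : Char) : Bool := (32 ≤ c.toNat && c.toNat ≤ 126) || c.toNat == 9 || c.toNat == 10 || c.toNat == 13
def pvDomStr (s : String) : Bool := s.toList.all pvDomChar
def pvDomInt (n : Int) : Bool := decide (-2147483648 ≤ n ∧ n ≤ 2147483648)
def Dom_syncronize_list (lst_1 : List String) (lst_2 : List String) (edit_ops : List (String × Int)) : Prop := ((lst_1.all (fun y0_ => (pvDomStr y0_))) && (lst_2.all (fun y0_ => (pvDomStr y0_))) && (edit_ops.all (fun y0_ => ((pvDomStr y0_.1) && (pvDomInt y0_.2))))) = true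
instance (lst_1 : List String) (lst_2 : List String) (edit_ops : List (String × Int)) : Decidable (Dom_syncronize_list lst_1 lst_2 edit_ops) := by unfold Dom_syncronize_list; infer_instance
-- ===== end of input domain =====

-- B replaces A's repeated list.insert calls by tag/count arrays filled in one pass plus a single
-- merge pass (objective: alternative). Equivalence is about the return value (neither mutates its arguments).

-- ===== PORT A =====

-- lst_1_sync[p][1] = tag  (Python negative-index wraparound; out-of-range = IndexError, excluded by Pre_)
def pvSetTagAt (l : List (List String)) (p : Int) (tag : String) : List (List String) :=
  let i : Int := if p < 0 then p + l.length else p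
  if 0 ≤ i ∧ i < (l.length : Int) then l.set i.toNat ((l.getD i.toNat []).set 1 tag) else l

-- Python list.insert(p, x) (clamping, never raising), int position
def pvInsertInt (l : List (List String)) (p : Int) (x : List String) : List (List String) :=
  let i : Int := if p < 0 then max 0 ((l.length : Int) + p) else min p (l.length : Int)
  l.insertIdx i.toNat x

-- Python list.insert(j, x) for a Nat position
def pvInsertNat (l : List (List String)) (j : Nat) (x : List String) : List (List String) :=
  l.insertIdx (min j l.length) x

-- the body of A's first loop (three successive ifs appending to deletion/insertion/replacement)
def pvTriStep (acc : List Int × List Int × List Int) (op : String × Int) :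
    List Int × List Int × List Int :=
  let acc := if op.1 == "delete" then (acc.1 ++ [op.2], acc.2.1, acc.2.2) else acc
  let acc := if op.1 == "insert" then (acc.1, acc.2.1 ++ [op.2], acc.2.2) else acc
  if op.1 == "replace" then (acc.1, acc.2.1, acc.2.2 ++ [op.2]) else acc

def syncronize_list (lst_1 : List String) (lst_2 : List String) (edit_ops : List (String × Int)) : List (List (List String)) :=
  let lst_1_sync := lst_1.map (fun e => [e, ""])
  let lst_2_sync := lst_2.map (fun e => [e, ""])
  let tri := edit_ops.foldl pvTriStep ([], [], [])
  let deletion := tri.1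
  let insertion := PySem.List.sorted tri.2.1 (fun x => x) true
  let replacement := tri.2.2
  let lst_1_sync := deletion.foldl (fun l p => pvSetTagAt l p "delete") lst_1_sync
  let lst_1_sync := replacement.foldl (fun l p => pvSetTagAt l p "replace") lst_1_sync
  let lst_1_sync := insertion.foldl (fun l p => pvInsertInt l p ["", "insert"]) lst_1_sync
  let lst_2_sync := (List.range lst_1_sync.length).foldl (fun l2 j =>
      if (lst_1_sync.getD j []).getD 1 "" == "delete" then pvInsertNat l2 j ["", "skip"] else l2)
    lst_2_sync
  [lst_1_sync, lst_2_sync]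

-- ===== PORT B =====

-- Python index resolution for tags[p] / cnt[p] (wraparound; out of range = no-op, unreached under Pre_)
def pvTagIdx (len : Nat) (p : Int) : Int := if p < 0 then p + len else p

def pvTagSet (tags : List String) (p : Int) (tag : String) : List String :=
  let i := pvTagIdx tags.length p
  if 0 ≤ i ∧ i < (tags.length : Int) then tags.set i.toNat tag else tags

def pvTagGet (tags : List String) (p : Int) : String :=
  let i := pvTagIdx tags.length p
  if 0 ≤ i ∧ i < (tags.length : Int) then tags.getD i.toNat "" else ""

def pvCntBump (cnt : List Nat) (p : Int) : List Nat :=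
  let i := pvTagIdx cnt.length p
  if 0 ≤ i ∧ i < (cnt.length : Int) then cnt.set i.toNat (cnt.getD i.toNat 0 + 1) else cnt

-- the body of B's single pass over edit_ops
def pvBStep (n : Nat) (st : List String × List Nat) (op : String × Int) :
    List String × List Nat :=
  if op.1 == "replace" then (pvTagSet st.1 op.2 "replace", st.2)
  else if op.1 == "delete" then
    (if pvTagGet st.1 op.2 == "replace" then st else (pvTagSet st.1 op.2 "delete", st.2))
  else if op.1 == "insert" then
    (st.1, pvCntBump st.2 (if op.2 < (n : Int) then op.2 else (n : Int)))
  else st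

-- B's inner while loop: copy lst_2 elements until the output reaches index d or lst_2 is exhausted
def pvFill (lst_2 : List String) (d : Nat) (out : List (List String)) (i2 : Nat) :
    List (List String) × Nat :=
  if h : i2 < lst_2.length ∧ out.length < d then
    pvFill lst_2 d (out ++ [[lst_2.getD i2 "", ""]]) (i2 + 1)
  else (out, i2)
termination_by lst_2.length - i2
decreasing_by omega

-- the body of B's loop over the delete positions D
def pvSkipStep (lst_2 : List String) (st : List (List String) × Nat) (d : Nat) :
    List (List String) × Nat :=
  let r := pvFill lst_2 d st.1 st.2
  (r.1 ++ [["", "skip"]], r.2)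

def syncronize_list_alt (lst_1 : List String) (lst_2 : List String) (edit_ops : List (String × Int)) : List (List (List String)) :=
  let n := lst_1.length
  let st := edit_ops.foldl (pvBStep n) (List.replicate n "", List.replicate (n + 1) 0)
  let tags := st.1
  let cnt := st.2
  let lst_1_sync := (List.range n).foldl (fun acc i =>
      acc ++ List.replicate (cnt.getD i 0) ["", "insert"] ++ [[lst_1.getD i "", tags.getD i ""]]) []
  let lst_1_sync := lst_1_sync ++ List.replicate (cnt.getD n 0) ["", "insert"]
  let D := (List.range lst_1_sync.length).filter (fun j => (lst_1_sync.getD j []).getD 1 "" == "delete")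
  let st2 := D.foldl (pvSkipStep lst_2) ([], 0)
  let lst_2_sync := st2.1 ++ (lst_2.drop st2.2).map (fun e => [e, ""])
  [lst_1_sync, lst_2_sync]

-- ===== PRECONDITION & SPEC =====
-- Pre_ excludes (a) out-of-range delete/replace positions, where A raises IndexError, and
-- (b) negative insert positions, where A's end-relative list.insert into the partially built
-- list (its meaning depends on how many inserts were already done) is an artefact of A's
-- insertion order, not a specified behaviour.
def Pre_syncronize_list (lst_1 : List String) (lst_2 : List String) (edit_ops : List (String × Int)) : Prop :=
  ∀ op ∈ edit_ops,
    ((op.1 = "delete" ∨ op.1 = "replace") →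
      -(lst_1.length : Int) ≤ op.2 ∧ op.2 < (lst_1.length : Int)) ∧
    (op.1 = "insert" → 0 ≤ op.2)
instance (lst_1 : List String) (lst_2 : List String) (edit_ops : List (String × Int)) : Decidable (Pre_syncronize_list lst_1 lst_2 edit_ops) := by unfold Pre_syncronize_list; infer_instance

def pvWitness_syncronize_list : List String × List String × (List (String × Int)) :=
  (["a", "b", "c"], ["a", "x"], [("delete", 2), ("replace", 1), ("insert", 0)])

def Spec_syncronize_list (lst_1 : List String) (lst_2 : List String) (edit_ops : List (String × Int)) (out : List (List (List String))) : Prop := out = syncronize_list_alt lst_1 lst_2 edit_ops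
instance (lst_1 : List String) (lst_2 : List String) (edit_ops : List (String × Int)) (out : List (List (List String))) : Decidable (Spec_syncronize_list lst_1 lst_2 edit_ops out) := by unfold Spec_syncronize_list; infer_instance

-- ===== CLAIM (what is proved, stated in full; the proofs are below) =====
def Claim_equal_syncronize_list : Prop := ∀ (lst_1 : List String) (lst_2 : List String) (edit_ops : List (String × Int)), Dom_syncronize_list lst_1 lst_2 edit_ops → Pre_syncronize_list lst_1 lst_2 edit_ops → Spec_syncronize_list lst_1 lst_2 edit_ops (syncronize_list lst_1 lst_2 edit_ops)

-- ===== LEMMAS AND PROOFS =====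

-- the cell inserted for an 'insert' op
def pvInsCell : List String := ["", "insert"]

-- wrapped (Python) index of an in-range position
def pvWrap (n : Nat) (p : Int) : Nat := (if p < 0 then p + n else p).toNat

def pvIsDel (n : Nat) (i : Nat) (op : String × Int) : Bool :=
  op.1 == "delete" && pvWrap n op.2 == i
def pvIsRep (n : Nat) (i : Nat) (op : String × Int) : Bool :=
  op.1 == "replace" && pvWrap n op.2 == i

-- final tag of original word i
def pvTagDescr (ops : List (String × Int)) (n i : Nat) : String :=
  if ops.any (pvIsRep n i) then "replace" else if ops.any (pvIsDel n i) then "delete" else ""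

-- gap index an insert position lands in
def pvClamp (n : Nat) (p : Int) : Nat := if p < (n : Int) then p.toNat else n

-- number of inserts landing in gap k
def pvCntDescr (ops : List (String × Int)) (n k : Nat) : Nat :=
  ops.countP (fun op => op.1 == "insert" && pvClamp n op.2 == k)

-- canonical interleaving: before cell i, (c i) insert markers; after all cells, (c length) markers
def pvInterleave (c : Nat → Nat) : List (List String) → List (List String)
  | [] => List.replicate (c 0) pvInsCell
  | x :: t => List.replicate (c 0) pvInsCell ++ x :: pvInterleave (fun i => c (i + 1)) t

-- per-op precondition
def pvPreOp (n : Nat) (op : String × Int) : Prop :=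
  ((op.1 = "delete" ∨ op.1 = "replace") → -(n : Int) ≤ op.2 ∧ op.2 < (n : Int)) ∧
  (op.1 = "insert" → 0 ≤ op.2)

lemma pv_insertIdx_eq (l : List (List String)) (k : Nat) (hk : k ≤ l.length) (x : List String) :
    l.insertIdx k x = l.take k ++ x :: l.drop k := by
  induction l generalizing k with
  | nil => have : k = 0 := by simp at hk; omega
           subst this; simp
  | cons a t ih =>
    cases k with
    | zero => simp
    | succ k => simp [List.insertIdx_succ_cons, ih k (by simpa using hk)]

lemma pvInterleave_zero (l : List (List String)) (c : Nat → Nat) (h : ∀ i, c i = 0) :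
    pvInterleave c l = l := by
  induction l generalizing c with
  | nil => simp [pvInterleave, h 0]
  | cons x t ih => simp [pvInterleave, h 0, ih (fun i => c (i + 1)) (fun i => h (i + 1))]

lemma pvSubL1 (l : List (List String)) (c c' : Nat → Nat)
    (h1 : ∀ i, i < l.length → c' i = c i)
    (h2 : c' l.length + 1 + c' (l.length + 1) = c l.length) :
    pvInterleave c' (l ++ [pvInsCell]) = pvInterleave c l := by
  induction l generalizing c c' with
  | nil =>
    simp only [List.length_nil] at h2
    show List.replicate (c' 0) pvInsCell ++ pvInsCell :: List.replicate (c' 1) pvInsCell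
        = List.replicate (c 0) pvInsCell
    rw [← h2, show c' 0 + 1 + c' 1 = c' 0 + (c' 1 + 1) from by omega, List.replicate_add,
        List.replicate_succ]
  | cons x t ih =>
    simp only [List.length_cons] at h2
    show List.replicate (c' 0) pvInsCell ++ x :: pvInterleave (fun i => c' (i + 1)) (t ++ [pvInsCell])
        = List.replicate (c 0) pvInsCell ++ x :: pvInterleave (fun i => c (i + 1)) t
    rw [h1 0 (by simp)]
    rw [ih (fun i => c (i + 1)) (fun i => c' (i + 1))
        (fun i hi => h1 (i + 1) (by simp only [List.length_cons]; omega))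
        (by simpa using h2)]

lemma pvSubL2 (p : Nat) (l : List (List String)) (c c' : Nat → Nat)
    (hp : p < l.length)
    (h1 : ∀ i, i < p → c' i = c i)
    (h2 : c' p + 1 = c p)
    (h3 : ∀ i, p < i → c' i = 0)
    (h4 : ∀ i, p < i → c i = 0) :
    pvInterleave c' (l.insertIdx p pvInsCell) = pvInterleave c l := by
  induction p generalizing l c c' with
  | zero =>
    cases l with
    | nil => simp at hp
    | cons x t =>
      show List.replicate (c' 0) pvInsCell ++ pvInsCell :: pvInterleave (fun i => c' (i + 1)) (x :: t)
          = List.replicate (c 0) pvInsCell ++ x :: pvInterleave (fun i => c (i + 1)) t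
      rw [pvInterleave_zero _ _ (fun i => h3 (i + 1) (by omega)),
          pvInterleave_zero _ _ (fun i => h4 (i + 1) (by omega))]
      rw [← h2, show c' 0 + 1 = c' 0 + 1 from rfl, List.replicate_add, List.replicate_succ]
      simp
  | succ p ih =>
    cases l with
    | nil => simp at hp
    | cons x t =>
      simp only [List.insertIdx_succ_cons, pvInterleave]
      rw [h1 0 (by omega)]
      rw [ih t (fun i => c (i + 1)) (fun i => c' (i + 1)) (by simp at hp; omega)
        (fun i hi => h1 (i + 1) (by omega)) h2 (fun i hi => h3 (i + 1) (by omega))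
        (fun i hi => h4 (i + 1) (by omega))]

-- splitting the tail-gap count when the list grows by one appended cell
lemma pvCntSplit (n : Nat) (rest : List Int) (h : ∀ q ∈ rest, 0 ≤ q) :
    rest.countP (fun q => pvClamp n q == n)
      = rest.countP (fun q => pvClamp (n + 1) q == n)
        + rest.countP (fun q => pvClamp (n + 1) q == n + 1) := by
  induction rest with
  | nil => simp
  | cons q t ih =>
    have hq : 0 ≤ q := h q (by simp)
    have ht := ih (fun x hx => h x (List.mem_cons_of_mem _ hx))
    simp only [List.countP_cons]
    have hind : (if (pvClamp n q == n) = true then 1 else 0)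
        = (if (pvClamp (n+1) q == n) = true then 1 else 0)
          + (if (pvClamp (n+1) q == n+1) = true then 1 else 0) := by
      simp only [pvClamp, beq_iff_eq]
      split_ifs <;> omega
    omega

-- the descending-insert fold produces the canonical interleaving
lemma pvInsDesc (ps : List Int) (hdesc : ps.Pairwise (fun a b => b ≤ a))
    (hpos : ∀ p ∈ ps, 0 ≤ p) (l : List (List String)) :
    ps.foldl (fun acc p => pvInsertInt acc p pvInsCell) l
      = pvInterleave (fun k => ps.countP (fun p => pvClamp l.length p == k)) l := by
  induction ps generalizing l with
  | nil =>
    simp only [List.foldl_nil]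
    rw [pvInterleave_zero]
    intro i; simp
  | cons p rest ih =>
    have hp0 : 0 ≤ p := hpos p (by simp)
    have hrle : ∀ q ∈ rest, q ≤ p := fun q hq => (List.pairwise_cons.mp hdesc).1 q hq
    have hrpos : ∀ q ∈ rest, 0 ≤ q := fun q hq => hpos q (by simp [hq])
    have hrdesc := (List.pairwise_cons.mp hdesc).2
    set n := l.length with hn
    simp only [List.foldl_cons]
    by_cases hpn : p < (n : Int)
    · -- insert strictly inside: position π = p.toNat < n
      have hπ : p.toNat < n := by omega
      have hins : pvInsertInt l p pvInsCell = l.insertIdx p.toNat pvInsCell := by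
        simp only [pvInsertInt]
        have : (if p < 0 then max 0 ((l.length : Int) + p) else min p (l.length : Int)) = p := by
          rw [if_neg (by omega)]; exact min_eq_left (by omega)
        rw [this]
      rw [hins]
      have hlen : (l.insertIdx p.toNat pvInsCell).length = n + 1 := by
        rw [List.length_insertIdx, if_pos (show p.toNat ≤ l.length by omega)]
      rw [ih hrdesc hrpos]
      rw [hlen]
      apply pvSubL2 p.toNat l _ _ hπ
      · intro i hi
        rw [List.countP_cons]
        have h0 : (pvClamp n p == i) = false := by
          simp only [pvClamp, beq_eq_false_iff_ne]; split_ifs <;> omega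
        rw [h0]
        simp only [Bool.false_eq_true, if_false, Nat.add_zero]
        apply List.countP_congr
        intro q hq
        have hq1 := hrle q hq; have hq2 := hrpos q hq
        simp only [pvClamp, beq_iff_eq]
        split_ifs <;> omega
      · rw [List.countP_cons]
        have h0 : (pvClamp n p == p.toNat) = true := by
          simp only [pvClamp, beq_iff_eq]; split_ifs <;> omega
        rw [h0, if_pos rfl]
        congr 1
        apply List.countP_congr
        intro q hq
        have hq1 := hrle q hq; have hq2 := hrpos q hq
        simp only [pvClamp, beq_iff_eq]
        split_ifs <;> omega
      · intro i hi
        rw [List.countP_eq_zero]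
        intro q hq
        have hq1 := hrle q hq; have hq2 := hrpos q hq
        simp only [pvClamp, beq_iff_eq]
        split_ifs <;> omega
      · intro i hi
        rw [List.countP_eq_zero]
        intro q hq
        rcases List.mem_cons.mp hq with hq | hq
        · subst hq; simp only [pvClamp, beq_iff_eq]; split_ifs <;> omega
        · have hq1 := hrle q hq; have hq2 := hrpos q hq
          simp only [pvClamp, beq_iff_eq]
          split_ifs <;> omega
    · -- insert at/after the end: append
      have hins : pvInsertInt l p pvInsCell = l ++ [pvInsCell] := by
        simp only [pvInsertInt]
        have : (if p < 0 then max 0 ((l.length : Int) + p) else min p (l.length : Int)) = (n : Int) := by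
          rw [if_neg (by omega)]; exact min_eq_right (by omega)
        rw [this]
        rw [show ((n : Int)).toNat = n by omega]
        rw [pv_insertIdx_eq l n (by omega)]
        simp [hn]
      rw [hins]
      rw [ih hrdesc hrpos]
      have hlen : (l ++ [pvInsCell]).length = n + 1 := by simp [hn]
      rw [hlen]
      apply pvSubL1 l
      · intro i hi
        rw [List.countP_cons]
        have h0 : (pvClamp n p == i) = false := by
          simp only [pvClamp, beq_eq_false_iff_ne]; split_ifs <;> omega
        rw [h0]
        simp only [Bool.false_eq_true, if_false, Nat.add_zero]
        apply List.countP_congr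
        intro q hq
        have hq1 := hrle q hq; have hq2 := hrpos q hq
        simp only [pvClamp, beq_iff_eq]
        split_ifs <;> omega
      · rw [← hn, List.countP_cons]
        have h0 : (pvClamp n p == n) = true := by
          simp only [pvClamp, beq_iff_eq]; split_ifs <;> omega
        rw [h0, if_pos rfl]
        rw [pvCntSplit n rest hrpos]
        omega

-- a single in-range tag assignment
lemma pvSetTagAt_eq (l : List (List String)) (p : Int) (tag : String)
    (hp : -(l.length : Int) ≤ p ∧ p < (l.length : Int)) :
    pvSetTagAt l p tag
      = l.set (pvWrap l.length p) ((l.getD (pvWrap l.length p) []).set 1 tag) := by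
  simp only [pvSetTagAt, pvWrap]
  rw [if_pos (by constructor <;> (split_ifs <;> omega))]

lemma pv_getD_set (l : List (List String)) (j i : Nat) (a : List String) (hj : j < l.length) :
    (l.set j a).getD i [] = if j = i then a else l.getD i [] := by
  by_cases hi : i < l.length
  · rw [List.getD_eq_getElem (l.set j a) [] (by simpa using hi), List.getElem_set,
        List.getD_eq_getElem l [] hi]
  · rw [List.getD_eq_default _ _ (by simp; omega), List.getD_eq_default _ _ (by omega),
        if_neg (by omega)]

-- the tag-set fold: length preserved, pointwise description
lemma pvSetFold (tag : String) (ps : List Int) (l : List (List String))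
    (hps : ∀ p ∈ ps, -(l.length : Int) ≤ p ∧ p < (l.length : Int)) :
    (ps.foldl (fun l p => pvSetTagAt l p tag) l).length = l.length ∧
    ∀ i, i < l.length →
      (ps.foldl (fun l p => pvSetTagAt l p tag) l).getD i []
        = if ps.any (fun p => pvWrap l.length p == i) then (l.getD i []).set 1 tag
          else l.getD i [] := by
  induction ps generalizing l with
  | nil => simp
  | cons p t ih =>
    have hp := hps p (by simp)
    have hwr : pvWrap l.length p < l.length := by
      simp only [pvWrap]; split_ifs <;> omega
    have hset := pvSetTagAt_eq l p tag hp
    have hlen' : (pvSetTagAt l p tag).length = l.length := by rw [hset]; simp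
    have hIH := ih (pvSetTagAt l p tag)
      (by rw [hlen']; exact fun q hq => hps q (List.mem_cons_of_mem _ hq))
    rw [hlen'] at hIH
    obtain ⟨hL, hG⟩ := hIH
    constructor
    · simp only [List.foldl_cons]; exact hL
    · intro i hi
      simp only [List.foldl_cons]
      rw [hG i hi]
      have hgd : (pvSetTagAt l p tag).getD i []
          = if pvWrap l.length p = i then (l.getD i []).set 1 tag else l.getD i [] := by
        rw [hset,
          pv_getD_set l (pvWrap l.length p) i ((l.getD (pvWrap l.length p) []).set 1 tag) hwr]
        by_cases hji : pvWrap l.length p = i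
        · rw [if_pos hji, if_pos hji, hji]
        · rw [if_neg hji, if_neg hji]
      rw [List.any_cons, hgd]
      by_cases hji : pvWrap l.length p = i
      · by_cases ht : t.any (fun q => pvWrap l.length q == i)
        · rw [if_pos ht, if_pos hji, if_pos (by simp [hji, ht]), List.set_set]
        · rw [if_neg ht, if_pos hji, if_pos (by simp [hji])]
      · have hbf : (pvWrap l.length p == i) = false := by simp [hji]
        by_cases ht : t.any (fun q => pvWrap l.length q == i)
        · rw [if_pos ht, if_neg hji, if_pos (by simp [ht])]
        · rw [if_neg ht, if_neg hji, if_neg (by simp [hbf, ht])]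

-- one in-range tag write / read / counter bump for B
lemma pvTagSet_eq (tags : List String) (p : Int) (tag : String)
    (hp : -(tags.length : Int) ≤ p ∧ p < (tags.length : Int)) :
    pvTagSet tags p tag = tags.set (pvWrap tags.length p) tag := by
  simp only [pvTagSet, pvTagIdx, pvWrap]
  rw [if_pos (by constructor <;> (split_ifs <;> omega))]

lemma pvTagGet_eq (tags : List String) (p : Int)
    (hp : -(tags.length : Int) ≤ p ∧ p < (tags.length : Int)) :
    pvTagGet tags p = tags.getD (pvWrap tags.length p) "" := by
  simp only [pvTagGet, pvTagIdx, pvWrap]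
  rw [if_pos (by constructor <;> (split_ifs <;> omega))]

lemma pvCntBump_eq (cnt : List Nat) (p : Int)
    (hp : 0 ≤ p ∧ p < (cnt.length : Int)) :
    pvCntBump cnt p = cnt.set p.toNat (cnt.getD p.toNat 0 + 1) := by
  simp only [pvCntBump, pvTagIdx]
  rw [if_neg (show ¬ p < 0 by omega)]
  rw [if_pos (by constructor <;> omega)]

lemma pv_getD_set_str (l : List String) (j i : Nat) (a : String) (hj : j < l.length) :
    (l.set j a).getD i "" = if j = i then a else l.getD i "" := by
  by_cases hi : i < l.length
  · rw [List.getD_eq_getElem (l.set j a) "" (by simpa using hi), List.getElem_set,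
        List.getD_eq_getElem l "" hi]
  · rw [List.getD_eq_default _ _ (by simp; omega), List.getD_eq_default _ _ (by omega),
        if_neg (by omega)]

lemma pv_getD_set_nat (l : List Nat) (j i : Nat) (a : Nat) (hj : j < l.length) :
    (l.set j a).getD i 0 = if j = i then a else l.getD i 0 := by
  by_cases hi : i < l.length
  · rw [List.getD_eq_getElem (l.set j a) 0 (by simpa using hi), List.getElem_set,
        List.getD_eq_getElem l 0 hi]
  · rw [List.getD_eq_default _ _ (by simp; omega), List.getD_eq_default _ _ (by omega),
        if_neg (by omega)]

lemma pvTagDescr_append (ops : List (String × Int)) (op : String × Int) (n i : Nat) :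
    pvTagDescr (ops ++ [op]) n i
      = if (ops.any (pvIsRep n i) || pvIsRep n i op) then "replace"
        else if (ops.any (pvIsDel n i) || pvIsDel n i op) then "delete" else "" := by
  simp only [pvTagDescr, List.any_append, List.any_cons, List.any_nil, Bool.or_false]

lemma pvTagDescr_def (ops : List (String × Int)) (n i : Nat) :
    (if ops.any (pvIsRep n i) then "replace"
     else if ops.any (pvIsDel n i) then "delete" else "") = pvTagDescr ops n i := rfl

lemma pvCntDescr_append (ops : List (String × Int)) (op : String × Int) (n k : Nat) :
    pvCntDescr (ops ++ [op]) n k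
      = pvCntDescr ops n k + (if op.1 == "insert" && pvClamp n op.2 == k then 1 else 0) := by
  simp [pvCntDescr, List.countP_append, List.countP_cons]

-- B's op fold invariant
lemma pvBFold (n : Nat) (ops : List (String × Int)) (h : ∀ op ∈ ops, pvPreOp n op) :
    (ops.foldl (pvBStep n) (List.replicate n "", List.replicate (n + 1) 0)).1.length = n ∧
    (ops.foldl (pvBStep n) (List.replicate n "", List.replicate (n + 1) 0)).2.length = n + 1 ∧
    (∀ i, i < n →
      (ops.foldl (pvBStep n) (List.replicate n "", List.replicate (n + 1) 0)).1.getD i ""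
        = pvTagDescr ops n i) ∧
    (∀ k, k ≤ n →
      (ops.foldl (pvBStep n) (List.replicate n "", List.replicate (n + 1) 0)).2.getD k 0
        = pvCntDescr ops n k) := by
  induction ops using List.reverseRecOn with
  | nil =>
    refine ⟨by simp, by simp, fun i hi => ?_, fun k hk => ?_⟩
    · rw [List.foldl_nil, List.getD_replicate _ hi]
      simp [pvTagDescr]
    · rw [List.foldl_nil, List.getD_replicate _ (by omega)]
      simp [pvCntDescr]
  | append_singleton ops op ih =>
    obtain ⟨hT, hC, hTg, hCg⟩ := ih (fun q hq => h q (by simp [hq]))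
    have hop := h op (by simp)
    rw [List.foldl_append, List.foldl_cons, List.foldl_nil]
    set st := ops.foldl (pvBStep n) (List.replicate n "", List.replicate (n + 1) 0) with hst
    by_cases hrep : op.1 == "replace"
    · have hd : (op.1 == "delete") = false := by
        simp only [beq_iff_eq] at *; simp [hrep]
      have hins : (op.1 == "insert") = false := by
        simp only [beq_iff_eq] at *; simp [hrep]
      have hrange := hop.1 (Or.inr (by simpa using hrep))
      rw [pvBStep, if_pos hrep]
      have hset : pvTagSet st.1 op.2 "replace" = st.1.set (pvWrap n op.2) "replace" := by
        rw [pvTagSet_eq st.1 op.2 "replace" (by rw [hT]; exact hrange), hT]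
      have hwr : pvWrap n op.2 < n := by simp only [pvWrap]; split_ifs <;> omega
      refine ⟨by simp [hset, hT], by simpa using hC, fun i hi => ?_, fun k hk => ?_⟩
      · rw [hset, pv_getD_set_str st.1 (pvWrap n op.2) i "replace" (by rw [hT]; exact hwr),
            pvTagDescr_append, (show pvIsDel n i op = false by simp [pvIsDel, hd]),
            Bool.or_false]
        by_cases hji : pvWrap n op.2 = i
        · rw [if_pos hji, (show pvIsRep n i op = true by simp [pvIsRep, hrep, hji]),
              Bool.or_true, if_pos rfl]
        · rw [if_neg hji, (show pvIsRep n i op = false by simp [pvIsRep, hji]),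
              Bool.or_false, pvTagDescr_def, hTg i hi]
      · rw [pvCntDescr_append, ← hCg k hk, hins, Bool.false_and]
        simp
    · by_cases hdel : op.1 == "delete"
      · have hins : (op.1 == "insert") = false := by
          simp only [beq_iff_eq] at *; simp [hdel]
        have hrange := hop.1 (Or.inl (by simpa using hdel))
        have hwr : pvWrap n op.2 < n := by simp only [pvWrap]; split_ifs <;> omega
        rw [pvBStep, if_neg (by simp [hrep]), if_pos hdel]
        have hget : pvTagGet st.1 op.2 = pvTagDescr ops n (pvWrap n op.2) := by
          rw [pvTagGet_eq st.1 op.2 (by rw [hT]; exact hrange), hT]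
          exact hTg _ hwr
        by_cases hprev : ops.any (pvIsRep n (pvWrap n op.2))
        · -- already replaced: state unchanged
          have hgr : (pvTagGet st.1 op.2 == "replace") = true := by
            rw [hget]; simp [pvTagDescr, hprev]
          rw [if_pos hgr]
          refine ⟨hT, hC, fun i hi => ?_, fun k hk => ?_⟩
          · rw [hTg i hi, pvTagDescr_append,
                (show pvIsRep n i op = false by simp [pvIsRep, hrep]), Bool.or_false]
            by_cases hji : pvWrap n op.2 = i
            · have hprev' : ops.any (pvIsRep n i) = true := by rw [← hji]; exact hprev
              rw [hprev', ← pvTagDescr_def, hprev', if_pos rfl, if_pos rfl]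
            · rw [(show pvIsDel n i op = false by simp [pvIsDel, hji]), Bool.or_false,
                  pvTagDescr_def]
          · rw [pvCntDescr_append, ← hCg k hk, hins, Bool.false_and]
            simp
        · -- mark as deleted
          have hgr : (pvTagGet st.1 op.2 == "replace") = false := by
            rw [hget]
            simp only [pvTagDescr, hprev, Bool.false_eq_true, if_false]
            split_ifs <;> simp
          rw [if_neg (by simp [hgr])]
          have hset : pvTagSet st.1 op.2 "delete" = st.1.set (pvWrap n op.2) "delete" := by
            rw [pvTagSet_eq st.1 op.2 "delete" (by rw [hT]; exact hrange), hT]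
          refine ⟨by simp [hset, hT], by simpa using hC, fun i hi => ?_, fun k hk => ?_⟩
          · rw [hset, pv_getD_set_str st.1 (pvWrap n op.2) i "delete" (by rw [hT]; exact hwr),
                pvTagDescr_append,
                (show pvIsRep n i op = false by simp [pvIsRep, hrep]), Bool.or_false]
            by_cases hji : pvWrap n op.2 = i
            · have hprev' : ops.any (pvIsRep n i) = false := by
                rw [← hji]; simpa using hprev
              rw [if_pos hji, hprev',
                  (show pvIsDel n i op = true by simp [pvIsDel, hdel, hji]), Bool.or_true,
                  if_neg (by simp), if_pos rfl]
            · rw [if_neg hji, (show pvIsDel n i op = false by simp [pvIsDel, hji]),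
                  Bool.or_false, pvTagDescr_def, hTg i hi]
          · rw [pvCntDescr_append, ← hCg k hk, hins, Bool.false_and]
            simp
      · by_cases hins : op.1 == "insert"
        · have hpos : 0 ≤ op.2 := hop.2 (by simpa using hins)
          rw [pvBStep, if_neg (by simp [hrep]), if_neg (by simp [hdel]), if_pos hins]
          have harg : (0 ≤ (if op.2 < (n : Int) then op.2 else (n : Int)) ∧
              (if op.2 < (n : Int) then op.2 else (n : Int)) < (st.2.length : Int)) := by
            rw [hC]; constructor <;> (split_ifs <;> omega)
          have hbump := pvCntBump_eq st.2 _ harg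
          have htn : (if op.2 < (n : Int) then op.2 else (n : Int)).toNat = pvClamp n op.2 := by
            simp only [pvClamp]; split_ifs <;> omega
          rw [htn] at hbump
          have hcl : pvClamp n op.2 ≤ n := by simp only [pvClamp]; split_ifs <;> omega
          refine ⟨hT, by simp [hbump, hC], fun i hi => ?_, fun k hk => ?_⟩
          · rw [hTg i hi, pvTagDescr_append,
                (show pvIsRep n i op = false by simp [pvIsRep, hrep]), Bool.or_false,
                (show pvIsDel n i op = false by simp [pvIsDel, hdel]), Bool.or_false,
                pvTagDescr_def]
          · rw [hbump, pvCntDescr_append,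
                pv_getD_set_nat st.2 (pvClamp n op.2) k _ (by rw [hC]; omega)]
            by_cases hji : pvClamp n op.2 = k
            · rw [if_pos hji, hji, hCg k hk, hins, Bool.true_and, beq_self_eq_true,
                  if_pos rfl]
            · rw [if_neg hji, hCg k hk,
                  (show (pvClamp n op.2 == k) = false by simp [hji]), Bool.and_false]
              simp
        · rw [pvBStep, if_neg (by simp [hrep]), if_neg (by simp [hdel]), if_neg (by simp [hins])]
          refine ⟨hT, hC, fun i hi => ?_, fun k hk => ?_⟩
          · rw [hTg i hi, pvTagDescr_append,
                (show pvIsRep n i op = false by simp [pvIsRep, hrep]), Bool.or_false,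
                (show pvIsDel n i op = false by simp [pvIsDel, hdel]), Bool.or_false,
                pvTagDescr_def]
          · rw [pvCntDescr_append, ← hCg k hk,
                (show (op.1 == "insert") = false by simp [hins]), Bool.false_and]
            simp

-- the interleaving as a flatMap over range (B's build loop)
lemma pvInterleave_flatMap (cells : List (List String)) (c : Nat → Nat) :
    pvInterleave c cells
      = (List.range cells.length).flatMap
          (fun i => List.replicate (c i) pvInsCell ++ [cells.getD i []])
        ++ List.replicate (c cells.length) pvInsCell := by
  induction cells generalizing c with
  | nil => simp [pvInterleave]
  | cons x t ih =>
    show List.replicate (c 0) pvInsCell ++ x :: pvInterleave (fun i => c (i + 1)) t = _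
    rw [ih (fun i => c (i + 1))]
    simp only [List.length_cons, List.range_succ_eq_map, List.flatMap_cons, List.getD_cons_zero]
    rw [List.flatMap_map]
    have hcongr : ∀ i ∈ List.range t.length,
        (fun a => List.replicate (c a.succ) pvInsCell ++ [(x :: t).getD a.succ []]) i
          = (fun i => List.replicate (c (i + 1)) pvInsCell ++ [t.getD i []]) i := by
      intro i _
      simp [Nat.succ_eq_add_one, List.getD_cons_succ]
    rw [List.flatMap_congr hcongr]
    simp [List.append_assoc]

-- pvFill characterised
lemma pvFill_eq (lst_2 : List String) (d : Nat) (out : List (List String)) (i2 : Nat) :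
    pvFill lst_2 d out i2
      = (out ++ (((lst_2.drop i2).map (fun e => [e, ""])).take (d - out.length)),
         i2 + min (d - out.length) (lst_2.length - i2)) := by
  fun_induction pvFill lst_2 d out i2 with
  | case1 out i2 h ih =>
    rw [ih]
    have hd : i2 < lst_2.length := h.1
    have hdrop : lst_2.drop i2 = lst_2[i2] :: lst_2.drop (i2 + 1) := List.drop_eq_getElem_cons hd
    rw [Prod.mk.injEq]
    constructor
    · rw [hdrop, List.map_cons, List.getD_eq_getElem lst_2 "" hd,
          show d - out.length = (d - (out.length + 1)) + 1 from by omega,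
          List.take_succ_cons]
      simp
    · simp only [List.length_append, List.length_cons, List.length_nil]
      omega
  | case2 out i2 h =>
    rw [Prod.mk.injEq]
    constructor
    · by_cases h1 : out.length < d
      · have h2 : lst_2.length ≤ i2 := by omega
        rw [List.drop_eq_nil_of_le h2]
        simp
      · rw [show d - out.length = 0 from by omega]
        simp
    · have hmin : min (d - out.length) (lst_2.length - i2) = 0 := by omega
      rw [hmin]
      omega

-- A's ascending insert fold over lst_2 equals B's fill/skip fold
lemma pvMerge2 (l2 : List String) : ∀ (D : List Nat), D.Pairwise (· < ·) →
    ∀ (out : List (List String)) (i2 : Nat), i2 ≤ l2.length → (∀ d ∈ D, out.length ≤ d) →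
    D.foldl (fun acc d => pvInsertNat acc d ["", "skip"]) (out ++ (l2.drop i2).map (fun e => [e, ""]))
      = (D.foldl (pvSkipStep l2) (out, i2)).1
        ++ (l2.drop (D.foldl (pvSkipStep l2) (out, i2)).2).map (fun e => [e, ""]) := by
  intro D
  induction D with
  | nil => intro _ out i2 _ _; simp
  | cons d ds ih =>
    intro hP out i2 hi2 hout
    obtain ⟨hd, hds⟩ := List.pairwise_cons.mp hP
    have hodl : out.length ≤ d := hout d (by simp)
    set S := (l2.drop i2).map (fun e => [e, ""]) with hS
    have hSlen : S.length = l2.length - i2 := by simp [hS]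
    set k := min (d - out.length) (l2.length - i2) with hk
    have hkS : k ≤ l2.length - i2 := by omega
    have hfill := pvFill_eq l2 d out i2
    have htake : (((l2.drop i2).map (fun e => [e, ""]))).take (d - out.length) = S.take k := by
      by_cases hc : d - out.length ≤ l2.length - i2
      · rw [show k = d - out.length from by omega]
      · rw [List.take_of_length_le (by rw [← hS, hSlen]; omega),
            List.take_of_length_le (by rw [hSlen]; omega)]
    rw [htake, ← hk] at hfill
    have hstep : pvSkipStep l2 (out, i2) d = ((out ++ S.take k) ++ [["", "skip"]], i2 + k) := by
      simp only [pvSkipStep]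
      rw [hfill]
    have hXlen : (out ++ S).length = out.length + (l2.length - i2) := by
      rw [List.length_append, hSlen]
    have hmin : min d (out ++ S).length = out.length + k := by
      rw [hXlen]; omega
    have hSd : S.drop k = (l2.drop (i2 + k)).map (fun e => [e, ""]) := by
      rw [hS, ← List.map_drop, List.drop_drop]
    have hins : pvInsertNat (out ++ S) d ["", "skip"]
        = ((out ++ S.take k) ++ [["", "skip"]]) ++ (l2.drop (i2 + k)).map (fun e => [e, ""]) := by
      rw [pvInsertNat, hmin, pv_insertIdx_eq _ _ (by rw [hXlen]; omega)]
      rw [List.take_append, List.drop_append,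
          List.take_of_length_le (by omega), List.drop_eq_nil_of_le (by omega),
          show out.length + k - out.length = k from by omega, hSd]
      simp
    simp only [List.foldl_cons]
    rw [hins, hstep]
    have happ := ih hds ((out ++ S.take k) ++ [["", "skip"]]) (i2 + k) (by omega)
      (by
        intro d' hd'
        have := hd d' hd'
        simp only [List.length_append, List.length_take, List.length_cons, List.length_nil]
        rw [hSlen]
        omega)
    exact happ

-- the canonical tagged cell list
def pvCells (lst_1 : List String) (ops : List (String × Int)) : List (List String) :=
  (List.range lst_1.length).map (fun i => [lst_1.getD i "", pvTagDescr ops lst_1.length i])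

-- A's triple-collection loop characterised as filters
lemma pvTri (ops : List (String × Int)) (a b c : List Int) :
    ops.foldl pvTriStep (a, b, c)
      = (a ++ (ops.filter (fun op => op.1 == "delete")).map (·.2),
         b ++ (ops.filter (fun op => op.1 == "insert")).map (·.2),
         c ++ (ops.filter (fun op => op.1 == "replace")).map (·.2)) := by
  induction ops generalizing a b c with
  | nil => simp
  | cons op t ih =>
    simp only [List.foldl_cons, List.filter_cons]
    rw [pvTriStep]
    by_cases h1 : op.1 == "delete"
    · have h2 : (op.1 == "insert") = false := by
        simp only [beq_iff_eq] at *; simp [h1]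
      have h3 : (op.1 == "replace") = false := by
        simp only [beq_iff_eq] at *; simp [h1]
      simp [h1, h2, h3, ih, List.append_assoc]
    · by_cases h2 : op.1 == "insert"
      · have h3 : (op.1 == "replace") = false := by
          simp only [beq_iff_eq] at *; simp [h2]
        simp [h1, h2, h3, ih, List.append_assoc]
      · by_cases h3 : op.1 == "replace"
        · simp [h1, h2, h3, ih, List.append_assoc]
        · simp [h1, h2, h3, ih]

-- A's lst_1_sync equals the canonical interleaving
lemma pvA_L1 (lst_1 : List String) (ops : List (String × Int))
    (hPre : ∀ op ∈ ops, pvPreOp lst_1.length op) :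
    (PySem.List.sorted (ops.foldl pvTriStep ([], [], [])).2.1 (fun x => x) true).foldl
        (fun l p => pvInsertInt l p ["", "insert"])
        ((ops.foldl pvTriStep ([], [], [])).2.2.foldl (fun l p => pvSetTagAt l p "replace")
          ((ops.foldl pvTriStep ([], [], [])).1.foldl (fun l p => pvSetTagAt l p "delete")
            (lst_1.map (fun e => [e, ""]))))
      = pvInterleave (pvCntDescr ops lst_1.length) (pvCells lst_1 ops) := by
  simp only [pvTri, List.nil_append]
  set n := lst_1.length with hn
  set cells0 := lst_1.map (fun e => [e, ""]) with hc0
  have hc0len : cells0.length = n := by rw [hc0, List.length_map, hn]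
  set dels := (ops.filter (fun op => op.1 == "delete")).map (·.2) with hdels
  set inss := (ops.filter (fun op => op.1 == "insert")).map (·.2) with hinss
  set reps := (ops.filter (fun op => op.1 == "replace")).map (·.2) with hreps
  have hmemdel : ∀ p ∈ dels, -(n : Int) ≤ p ∧ p < (n : Int) := by
    intro p hp
    rw [hdels] at hp
    obtain ⟨op, hopmem, rfl⟩ := List.mem_map.mp hp
    have hf := List.mem_filter.mp hopmem
    exact (hPre op hf.1).1 (Or.inl (by simpa using hf.2))
  have hmemrep : ∀ p ∈ reps, -(n : Int) ≤ p ∧ p < (n : Int) := by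
    intro p hp
    rw [hreps] at hp
    obtain ⟨op, hopmem, rfl⟩ := List.mem_map.mp hp
    have hf := List.mem_filter.mp hopmem
    exact (hPre op hf.1).1 (Or.inr (by simpa using hf.2))
  have hmemins : ∀ p ∈ inss, 0 ≤ p := by
    intro p hp
    rw [hinss] at hp
    obtain ⟨op, hopmem, rfl⟩ := List.mem_map.mp hp
    have hf := List.mem_filter.mp hopmem
    exact (hPre op hf.1).2 (by simpa using hf.2)
  obtain ⟨hlen1, hget1⟩ := pvSetFold "delete" dels cells0 (by rw [hc0len]; exact hmemdel)
  set M1 := dels.foldl (fun l p => pvSetTagAt l p "delete") cells0 with hM1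
  obtain ⟨hlen2, hget2⟩ := pvSetFold "replace" reps M1
    (by rw [hlen1, hc0len]; exact hmemrep)
  set M2 := reps.foldl (fun l p => pvSetTagAt l p "replace") M1 with hM2def
  have hM2len : M2.length = n := by rw [hlen2, hlen1, hc0len]
  have hcell : ∀ i, i < n → M2.getD i [] = [lst_1.getD i "", pvTagDescr ops n i] := by
    intro i hi
    have e2 := hget2 i (by rw [hlen1, hc0len]; exact hi)
    rw [hlen1, hc0len] at e2
    have e1 := hget1 i (by rw [hc0len]; exact hi)
    rw [hc0len] at e1
    have e0 : cells0.getD i [] = [lst_1.getD i "", ""] := by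
      rw [hc0, List.getD_eq_getElem _ _ (by rw [List.length_map, ← hn]; exact hi),
          List.getElem_map, List.getD_eq_getElem _ _ (by rw [← hn]; exact hi)]
    have hanyd : dels.any (fun p => pvWrap n p == i) = ops.any (pvIsDel n i) := by
      rw [hdels, List.any_map, List.any_filter]
      rfl
    have hanyr : reps.any (fun p => pvWrap n p == i) = ops.any (pvIsRep n i) := by
      rw [hreps, List.any_map, List.any_filter]
      rfl
    rw [e2, e1, e0, hanyd, hanyr]
    simp only [pvTagDescr]
    by_cases h1 : ops.any (pvIsRep n i) <;> by_cases h2 : ops.any (pvIsDel n i) <;>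
      simp [h1, h2]
  have hM2 : M2 = pvCells lst_1 ops := by
    apply List.ext_getElem
    · rw [hM2len]; simp [pvCells, hn]
    · intro i h1 h2
      have hi : i < n := by rwa [hM2len] at h1
      have := hcell i hi
      rw [List.getD_eq_getElem M2 [] h1] at this
      rw [this]
      simp [pvCells]
      rw [← hn]
  rw [hM2]
  have hdesc : (PySem.List.sorted inss (fun x => x) true).Pairwise (fun a b => b ≤ a) := by
    have := PySem.List.sorted_pairwise_rev inss (fun x => x)
    simpa using this
  have hpos : ∀ p ∈ PySem.List.sorted inss (fun x => x) true, 0 ≤ p := by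
    intro p hp
    rw [PySem.List.mem_sorted] at hp
    exact hmemins p hp
  rw [show (fun l p => pvInsertInt l p ["", "insert"])
        = (fun acc p => pvInsertInt acc p pvInsCell) from rfl]
  rw [pvInsDesc _ hdesc hpos]
  congr 1
  funext kk
  rw [List.Perm.countP_eq _ (PySem.List.sorted_perm inss (fun x => x) true)]
  have hclen : (pvCells lst_1 ops).length = n := by simp [pvCells, hn]
  rw [hclen, hinss, List.countP_map, List.countP_filter]
  simp only [pvCntDescr]
  apply List.countP_congr
  intro a _
  simp [Function.comp, Bool.and_comm]

-- B's lst_1_sync equals the canonical interleaving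
lemma pvB_L1 (lst_1 : List String) (ops : List (String × Int))
    (hPre : ∀ op ∈ ops, pvPreOp lst_1.length op) :
    ((List.range lst_1.length).foldl (fun acc i =>
        acc ++ List.replicate ((ops.foldl (pvBStep lst_1.length)
            (List.replicate lst_1.length "", List.replicate (lst_1.length + 1) 0)).2.getD i 0)
            ["", "insert"]
          ++ [[lst_1.getD i "",
               (ops.foldl (pvBStep lst_1.length)
                 (List.replicate lst_1.length "", List.replicate (lst_1.length + 1) 0)).1.getD i ""]])
        [])
      ++ List.replicate ((ops.foldl (pvBStep lst_1.length)
            (List.replicate lst_1.length "", List.replicate (lst_1.length + 1) 0)).2.getD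
            lst_1.length 0) ["", "insert"]
      = pvInterleave (pvCntDescr ops lst_1.length) (pvCells lst_1 ops) := by
  set n := lst_1.length with hn
  obtain ⟨hT, hC, hTg, hCg⟩ := pvBFold n ops hPre
  set st := ops.foldl (pvBStep n) (List.replicate n "", List.replicate (n + 1) 0) with hst
  simp only [List.append_assoc]
  rw [PySem.List.foldl_append_eq_flatMap
      (fun i => List.replicate (st.2.getD i 0) ["", "insert"]
        ++ [[lst_1.getD i "", st.1.getD i ""]]) (List.range n) []]
  rw [List.nil_append]
  rw [pvInterleave_flatMap (pvCells lst_1 ops) (pvCntDescr ops n)]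
  have hclen : (pvCells lst_1 ops).length = n := by simp [pvCells, hn]
  rw [hclen]
  congr 1
  · apply List.flatMap_congr
    intro i hi
    have hin : i < n := List.mem_range.mp hi
    rw [hTg i hin, hCg i (by omega)]
    have hcg : (pvCells lst_1 ops).getD i []
        = [lst_1.getD i "", pvTagDescr ops lst_1.length i] := by
      simp only [pvCells]
      rw [List.getD_eq_getElem _ _ (by simp; omega)]
      simp
    rw [hcg, ← hn]
    rfl
  · rw [hCg n (le_refl n)]
    rfl

-- A's second loop equals B's fill/skip merge
lemma pvPhase2 (L1 : List (List String)) (lst_2 : List String) :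
    (List.range L1.length).foldl (fun l2 j =>
        if (L1.getD j []).getD 1 "" == "delete" then pvInsertNat l2 j ["", "skip"] else l2)
      (lst_2.map (fun e => [e, ""]))
    = (((List.range L1.length).filter (fun j => (L1.getD j []).getD 1 "" == "delete")).foldl
          (pvSkipStep lst_2) ([], 0)).1
      ++ (lst_2.drop
            ((((List.range L1.length).filter (fun j => (L1.getD j []).getD 1 "" == "delete")).foldl
              (pvSkipStep lst_2) ([], 0)).2)).map (fun e => [e, ""]) := by
  rw [PySem.List.foldl_if_eq_foldl_filter
      (fun j => (L1.getD j []).getD 1 "" == "delete")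
      (fun l2 j => pvInsertNat l2 j ["", "skip"])]
  have hP : ((List.range L1.length).filter
      (fun j => (L1.getD j []).getD 1 "" == "delete")).Pairwise (· < ·) :=
    List.Pairwise.sublist List.filter_sublist List.pairwise_lt_range
  have hm := pvMerge2 lst_2 _ hP [] 0 (by omega) (by intro d _; simp)
  simpa using hm

-- ===== VERDICT (by name: the statement is the Claim_ definition above) =====
theorem syncronize_list_spec : Claim_equal_syncronize_list := by
  intro lst_1 lst_2 ops _hDom hPre
  unfold Spec_syncronize_list
  have hPre' : ∀ op ∈ ops, pvPreOp lst_1.length op := fun op hop => hPre op hop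
  simp only [syncronize_list, syncronize_list_alt]
  rw [pvA_L1 lst_1 ops hPre', pvB_L1 lst_1 ops hPre', pvPhase2]
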